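-- pv_equiv track=rewrite | github.com/Aria-Dolatabadian/SNP-Calling-and-Visualisation | Code.py | find_snps
-- ===== SOURCE A (Python) =====
-- def find_snps(seq1, seq2):
--     snps = []
--     transitions = ['AG', 'GA', 'CT', 'TC']
--     transversions = ['AC', 'CA', 'AT', 'TA', 'GC', 'CG', 'GT', 'TG']
--
--     for i, (base1, base2) in enumerate(zip(seq1, seq2)):
--         if base1 != base2:
--             position = i + 1
--             snp = f"{base1}{position}{base2}"
--             if base1 + base2 in transitions:
--                 snps.append((position, base1, base2, 'Transition'))
--             elif base1 + base2 in transversions: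
--                 snps.append((position, base1, base2, 'Transversion'))
--
--     return snps
-- ===== SOURCE B (Python) =====
-- _TRANSITIONS = {('A', 'G'), ('G', 'A'), ('C', 'T'), ('T', 'C')}
-- _TRANSVERSIONS = {('A', 'C'), ('C', 'A'), ('A', 'T'), ('T', 'A'),
--                   ('G', 'C'), ('C', 'G'), ('G', 'T'), ('T', 'G')}
--
--
-- def find_snps(seq1, seq2):
--     pairs = list(zip(seq1, seq2))
--     transitions = [(i + 1, a, b, 'Transition')
--                    for i, (a, b) in enumerate(pairs) if (a, b) in _TRANSITIONS]
--     transversions = [(i + 1, a, b, 'Transversion')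
--                      for i, (a, b) in enumerate(pairs) if (a, b) in _TRANSVERSIONS]
--     # Positions are unique, so a stable sort by position merges the two
--     # staged lists back into position order.
--     return sorted(transitions + transversions, key=lambda snp: snp[0])
-- ===== Notes on version B (the rewrite author's own statement) =====
-- stated objective: alternative
-- what changed: Instead of A's single loop that classifies each mismatch as it goes, B runs two staged filtering passes -- one collecting all transition SNPs, one collecting all transversion SNPs, each via set membership of the base pair with no mismatch guard -- and merges them back into position order with a stable sort keyed on the (unique) positions; the unused snp f-string is dropped.
import Mathlib
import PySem

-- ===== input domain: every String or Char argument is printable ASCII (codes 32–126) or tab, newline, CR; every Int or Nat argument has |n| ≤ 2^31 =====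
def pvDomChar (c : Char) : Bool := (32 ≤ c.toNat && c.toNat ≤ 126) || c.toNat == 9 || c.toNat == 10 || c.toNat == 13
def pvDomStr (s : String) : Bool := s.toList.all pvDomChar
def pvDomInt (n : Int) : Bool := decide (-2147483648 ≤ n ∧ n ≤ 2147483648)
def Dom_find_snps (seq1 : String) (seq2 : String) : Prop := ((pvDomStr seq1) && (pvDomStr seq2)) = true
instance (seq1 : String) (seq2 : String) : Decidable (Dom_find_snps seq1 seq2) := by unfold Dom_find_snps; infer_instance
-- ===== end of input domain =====

-- B replaces A's single classifying loop by two staged filtering passes (transitions,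
-- then transversions) merged back into position order by a stable sort on the unique
-- positions (objective: alternative decomposition).


-- ===== PORT A =====
-- zip over 1-char Python strings is ported through toList (Chars); base1+base2 → String.ofList [b1, b2].
def find_snps (seq1 : String) (seq2 : String) : List (Int × String × String × String) :=
  let transitions : List String := ["AG", "GA", "CT", "TC"]
  let transversions : List String := ["AC", "CA", "AT", "TA", "GC", "CG", "GT", "TG"]
  (PySem.List.enumerate (seq1.toList.zip seq2.toList)).foldl
    (fun snps p =>
      let i := p.1
      let b1 := p.2.1
      let b2 := p.2.2
      if b1 ≠ b2 then
        let position : Int := i + 1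
        -- snp := f"{base1}{position}{base2}" is computed and unused in A; dropped here
        if String.ofList [b1] ++ String.ofList [b2] ∈ transitions then
          snps ++ [(position, String.ofList [b1], String.ofList [b2], "Transition")]
        else if String.ofList [b1] ++ String.ofList [b2] ∈ transversions then
          snps ++ [(position, String.ofList [b1], String.ofList [b2], "Transversion")]
        else snps
      else snps) []

-- ===== PORT B =====
def pvTransitionPairs : PySem.Set (Char × Char) :=
  PySem.Set.ofList [('A', 'G'), ('G', 'A'), ('C', 'T'), ('T', 'C')]
def pvTransversionPairs : PySem.Set (Char × Char) :=
  PySem.Set.ofList [('A', 'C'), ('C', 'A'), ('A', 'T'), ('T', 'A'),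
                    ('G', 'C'), ('C', 'G'), ('G', 'T'), ('T', 'G')]

def find_snps_alt (seq1 : String) (seq2 : String) : List (Int × String × String × String) :=
  let pairs := seq1.toList.zip seq2.toList
  let transitions := (PySem.List.enumerate pairs).filterMap
    (fun p => if PySem.Set.contains pvTransitionPairs (p.2.1, p.2.2) then
        some (p.1 + 1, String.ofList [p.2.1], String.ofList [p.2.2], "Transition")
      else none)
  let transversions := (PySem.List.enumerate pairs).filterMap
    (fun p => if PySem.Set.contains pvTransversionPairs (p.2.1, p.2.2) then
        some (p.1 + 1, String.ofList [p.2.1], String.ofList [p.2.2], "Transversion")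
      else none)
  PySem.List.sorted (transitions ++ transversions) (fun snp => snp.1) false

-- ===== PRECONDITION & SPEC =====
def Spec_find_snps (seq1 : String) (seq2 : String) (out : List (Int × String × String × String)) : Prop := out = find_snps_alt seq1 seq2
instance (seq1 : String) (seq2 : String) (out : List (Int × String × String × String)) : Decidable (Spec_find_snps seq1 seq2 out) := by unfold Spec_find_snps; infer_instance

-- ===== CLAIM (what is proved, stated in full; the proofs are below) =====
def Claim_equal_find_snps : Prop := ∀ (seq1 : String) (seq2 : String), Dom_find_snps seq1 seq2 → Spec_find_snps seq1 seq2 (find_snps seq1 seq2)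

-- ===== LEMMAS AND PROOFS =====

-- A's per-element classification, as an Option-valued step (proof helper).
def pvF (p : Int × Char × Char) : Option (Int × String × String × String) :=
  if p.2.1 ≠ p.2.2 then
    if String.ofList [p.2.1] ++ String.ofList [p.2.2] ∈ ["AG", "GA", "CT", "TC"] then
      some (p.1 + 1, String.ofList [p.2.1], String.ofList [p.2.2], "Transition")
    else if String.ofList [p.2.1] ++ String.ofList [p.2.2] ∈ ["AC", "CA", "AT", "TA", "GC", "CG", "GT", "TG"] then
      some (p.1 + 1, String.ofList [p.2.1], String.ofList [p.2.2], "Transversion")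
    else none
  else none

-- B's two staged filters (proof helpers, definitionally the lambdas of find_snps_alt).
def pvFti (p : Int × Char × Char) : Option (Int × String × String × String) :=
  if PySem.Set.contains pvTransitionPairs (p.2.1, p.2.2) then
    some (p.1 + 1, String.ofList [p.2.1], String.ofList [p.2.2], "Transition")
  else none
def pvFtv (p : Int × Char × Char) : Option (Int × String × String × String) :=
  if PySem.Set.contains pvTransversionPairs (p.2.1, p.2.2) then
    some (p.1 + 1, String.ofList [p.2.1], String.ofList [p.2.2], "Transversion")
  else none

lemma step_or (p : Int × Char × Char) :
    pvF p = (pvFti p).or (pvFtv p) ∧ (pvFti p = none ∨ pvFtv p = none) := by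
  obtain ⟨i, b1, b2⟩ := p
  by_cases h12 : b1 = b2
  · subst h12
    by_cases hA : b1 = 'A' <;> by_cases hG : b1 = 'G' <;>
      by_cases hC : b1 = 'C' <;> by_cases hT : b1 = 'T' <;>
      simp_all [pvF, pvFti, pvFtv, pvTransitionPairs, pvTransversionPairs,
        PySem.Set.contains, PySem.Set.ofList]
  · by_cases hA : b1 = 'A' <;> by_cases hG : b1 = 'G' <;>
      by_cases hC : b1 = 'C' <;> by_cases hT : b1 = 'T' <;>
      by_cases hA2 : b2 = 'A' <;> by_cases hG2 : b2 = 'G' <;>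
      by_cases hC2 : b2 = 'C' <;> by_cases hT2 : b2 = 'T' <;>
      simp_all [pvF, pvFti, pvFtv, pvTransitionPairs, pvTransversionPairs,
        PySem.Set.contains, PySem.Set.ofList, String.ext_iff]

lemma fst_pvF (p : Int × Char × Char) (x : Int × String × String × String)
    (h : pvF p = some x) : x.1 = p.1 + 1 := by
  unfold pvF at h
  split_ifs at h <;> (try injection h with h) <;> (try rw [← h])

-- A's accumulator loop is the filterMap of pvF.
lemma loop_eq (l : List (Char × Char)) (s : Int) (acc : List (Int × String × String × String)) :
    (PySem.List.enumerate l s).foldl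
      (fun snps p =>
        let i := p.1
        let b1 := p.2.1
        let b2 := p.2.2
        if b1 ≠ b2 then
          let position : Int := i + 1
          if String.ofList [b1] ++ String.ofList [b2] ∈ ["AG", "GA", "CT", "TC"] then
            snps ++ [(position, String.ofList [b1], String.ofList [b2], "Transition")]
          else if String.ofList [b1] ++ String.ofList [b2] ∈ ["AC", "CA", "AT", "TA", "GC", "CG", "GT", "TG"] then
            snps ++ [(position, String.ofList [b1], String.ofList [b2], "Transversion")]
          else snps
        else snps) acc
    = acc ++ (PySem.List.enumerate l s).filterMap pvF := by
  induction l generalizing s acc with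
  | nil => simp [PySem.List.enumerate]
  | cons hd tl ih =>
    obtain ⟨b1, b2⟩ := hd
    rw [PySem.List.enumerate_cons]
    simp only [List.foldl_cons, List.filterMap_cons]
    rw [ih]
    by_cases h12 : b1 = b2 <;> simp [pvF, h12] <;> split_ifs <;> simp_all

-- The classifying pass is a permutation of the two staged passes.
lemma perm_split (l : List (Int × Char × Char)) :
    (l.filterMap pvF).Perm (l.filterMap pvFti ++ l.filterMap pvFtv) := by
  induction l with
  | nil => simp
  | cons p t ih =>
    obtain ⟨hor, hdisj⟩ := step_or p
    simp only [List.filterMap_cons]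
    cases hti : pvFti p with
    | some x =>
      cases hdisj with
      | inl h => simp_all
      | inr htv =>
        rw [hor, hti, htv]
        simpa using ih.cons x
    | none =>
      cases htv : pvFtv p with
      | some y =>
        rw [hor, hti, htv]
        simp only [Option.or_some]
        exact (ih.cons y).trans List.perm_middle.symm
      | none =>
        rw [hor, hti, htv]
        simpa using ih

-- A's output is strictly increasing in position.
lemma pairwise_pvF (l : List (Char × Char)) (s : Int) :
    ((PySem.List.enumerate l s).filterMap pvF).Pairwise (fun a b => a.1 < b.1) := by
  rw [List.pairwise_filterMap]
  refine (PySem.List.pairwise_lt_enumerate (xs := l) (s := s)).imp_of_mem ?_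
  intro p q _ _ hlt x hx y hy
  rw [fst_pvF p x hx, fst_pvF q y hy]
  omega

-- ===== VERDICT (by name: the statement is the Claim_ definition above) =====
theorem find_snps_spec : Claim_equal_find_snps := by
  intro seq1 seq2 _
  show find_snps seq1 seq2 = find_snps_alt seq1 seq2
  unfold find_snps find_snps_alt
  rw [show (fun p : Int × Char × Char => if PySem.Set.contains pvTransitionPairs (p.2.1, p.2.2) then
        some (p.1 + 1, String.ofList [p.2.1], String.ofList [p.2.2], "Transition")
      else none) = pvFti from rfl,
     show (fun p : Int × Char × Char => if PySem.Set.contains pvTransversionPairs (p.2.1, p.2.2) then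
        some (p.1 + 1, String.ofList [p.2.1], String.ofList [p.2.2], "Transversion")
      else none) = pvFtv from rfl]
  rw [loop_eq (seq1.toList.zip seq2.toList) 0 []]
  simp only [List.nil_append]
  exact Eq.symm (PySem.List.sorted_eq_of_perm_of_pairwise_lt _ _ _
    (perm_split _) (pairwise_pvF _ _))
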